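-- pv_equiv track=rewrite | github.com/CUT-Labs/nuskell | nuskell/verifier/basis_finder.py | minimal_initial_state
-- ===== SOURCE A (Python) =====
-- def minimal_initial_state(pathway):
--     initial = []
--     current = []
--     for rxn in pathway:
--         for r in rxn[0]:
--             if r in current:
--                 current.remove(r)
--             else:
--                 initial.append(r)
--         for r in rxn[1]:
--             current.append(r)
--     return sorted(initial)
-- ===== SOURCE B (Python) =====
-- def minimal_initial_state(pathway):
--     # per-species event lists: -1 per reactant occurrence, +1 per product occurrence,
--     # in pathway order (reactants before products within a reaction)
--     pairs = []
--     for rxn in pathway: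
--         pairs.extend((r, -1) for r in rxn[0])
--         pairs.extend((p, 1) for p in rxn[1])
--     events = {}
--     for sp, e in pairs:
--         events[sp] = events.get(sp, []) + [e]
--     result = []
--     for sp, evs in events.items():
--         bal = low = 0
--         for e in evs:
--             bal += e
--             if bal < low:
--                 low = bal
--         result.extend([sp] * -low)
--     return sorted(result)
-- ===== Notes on version B (the rewrite author's own statement) =====
-- stated objective: faster
-- what changed: Replaces A's stateful simulation with membership/removal scans on a shared 'current' list by a per-species event-list pass: build each species' ordered +1/-1 events once, then take the negated minimum prefix balance as that species' required initial count.
import Mathlib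
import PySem

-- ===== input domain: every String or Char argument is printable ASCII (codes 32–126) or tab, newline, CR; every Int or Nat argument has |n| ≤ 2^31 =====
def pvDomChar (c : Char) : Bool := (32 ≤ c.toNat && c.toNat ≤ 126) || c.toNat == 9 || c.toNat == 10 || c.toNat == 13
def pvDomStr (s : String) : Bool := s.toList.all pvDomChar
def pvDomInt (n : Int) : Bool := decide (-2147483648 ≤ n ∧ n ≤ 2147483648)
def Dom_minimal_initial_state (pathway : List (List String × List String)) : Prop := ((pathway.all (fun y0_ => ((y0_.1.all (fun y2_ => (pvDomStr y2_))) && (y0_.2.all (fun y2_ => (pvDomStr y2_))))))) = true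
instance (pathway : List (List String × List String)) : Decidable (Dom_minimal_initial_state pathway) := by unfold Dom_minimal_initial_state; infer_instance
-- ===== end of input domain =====

-- B replaces A's shared-'current'-list simulation (quadratic membership/removal scans) by an
-- independent per-species event pass (negated minimum prefix balance = required initial copies);
-- measurably faster; return values proved equal on all inputs.

-- ===== PORT A =====
-- one reactant step of A: consume from current if present, else record as initial
def pvAReact (st : List String × List String) (r : String) : List String × List String :=
  if st.2.contains r then (st.1, st.2.erase r) else (st.1 ++ [r], st.2)

def minimal_initial_state (pathway : List (List String × List String)) : List String :=
  let st := pathway.foldl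
    (fun st rxn => rxn.2.foldl (fun st r => (st.1, st.2 ++ [r])) (rxn.1.foldl pvAReact st))
    ([], [])
  PySem.List.sorted st.1 (fun x => x) false

-- ===== PORT B =====
-- running balance and running minimum of the prefix balances of an event list
def pvBalLow (evs : List Int) : Int × Int :=
  evs.foldl (fun p e => (p.1 + e, if p.1 + e < p.2 then p.1 + e else p.2)) (0, 0)

def minimal_initial_state_alt (pathway : List (List String × List String)) : List String :=
  let pairs := pathway.foldl
    (fun acc rxn => acc ++ rxn.1.map (fun r => (r, (-1 : Int))) ++ rxn.2.map (fun p => (p, (1 : Int)))) []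
  let events : PySem.Dict String (List Int) :=
    pairs.foldl (fun d p => d.modify p.1 [] (· ++ [p.2])) PySem.Dict.empty
  let result := events.items.foldl
    (fun acc p => acc ++ List.replicate (-(pvBalLow p.2).2).toNat p.1) []
  PySem.List.sorted result (fun x => x) false

-- ===== PRECONDITION & SPEC =====
def Spec_minimal_initial_state (pathway : List (List String × List String)) (out : List String) : Prop := out = minimal_initial_state_alt pathway
instance (pathway : List (List String × List String)) (out : List String) : Decidable (Spec_minimal_initial_state pathway out) := by unfold Spec_minimal_initial_state; infer_instance

-- ===== CLAIM (what is proved, stated in full; the proofs are below) =====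
def Claim_equal_minimal_initial_state : Prop := ∀ (pathway : List (List String × List String)), Dom_minimal_initial_state pathway → Spec_minimal_initial_state pathway (minimal_initial_state pathway)

-- ===== LEMMAS AND PROOFS =====

-- abstract per-species machine: event -1 consumes from c (or bumps i), event +1 produces
def pvStep (p : Nat × Nat) (e : Int) : Nat × Nat :=
  if e < 0 then (if p.2 = 0 then (p.1 + 1, p.2) else (p.1, p.2 - 1)) else (p.1, p.2 + 1)

-- event list of a single species over the pathway
def pvEvs (s : String) (pathway : List (List String × List String)) : List Int :=
  pathway.flatMap (fun rxn => List.replicate (rxn.1.count s) (-1 : Int) ++ List.replicate (rxn.2.count s) 1)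

theorem pvAReact_count (rs : List String) (st : List String × List String) (s : String) :
    (((rs.foldl pvAReact st).1.count s, (rs.foldl pvAReact st).2.count s) : Nat × Nat)
      = (List.replicate (rs.count s) (-1 : Int)).foldl pvStep (st.1.count s, st.2.count s) := by
  induction rs generalizing st with
  | nil => simp
  | cons r rest ih =>
    rw [List.foldl_cons]
    by_cases hrs : r = s
    · subst hrs
      rw [List.count_cons_self, List.replicate_succ, List.foldl_cons, ih]
      congr 1
      by_cases hm : r ∈ st.2
      · have hc : 0 < st.2.count r := List.count_pos_iff.mpr hm
        simp [pvAReact, pvStep, hm, List.count_erase_self, Nat.pos_iff_ne_zero.mp hc]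
      · have hc : st.2.count r = 0 := List.count_eq_zero.mpr hm
        simp [pvAReact, pvStep, hm, hc]
    · rw [List.count_cons_of_ne (by simpa using hrs), ih]
      congr 1
      by_cases hm : r ∈ st.2
      · simp [pvAReact, hm, List.count_erase_of_ne (Ne.symm hrs)]
      · simp [pvAReact, hm, List.count_append, hrs]

theorem pvAProd_count (ps : List String) (st : List String × List String) (s : String) :
    ((( (ps.foldl (fun st r => (st.1, st.2 ++ [r])) st).1.count s,
        (ps.foldl (fun st r => (st.1, st.2 ++ [r])) st).2.count s)) : Nat × Nat)
      = (List.replicate (ps.count s) (1 : Int)).foldl pvStep (st.1.count s, st.2.count s) := by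
  induction ps generalizing st with
  | nil => simp
  | cons p rest ih =>
    rw [List.foldl_cons]
    by_cases hps : p = s
    · subst hps
      rw [List.count_cons_self, List.replicate_succ, List.foldl_cons, ih]
      congr 1
      simp [pvStep, List.count_append]
    · rw [List.count_cons_of_ne (by simpa using hps), ih]
      congr 1
      simp [List.count_append, hps]

theorem pvA_count (pathway : List (List String × List String)) (st : List String × List String) (s : String) :
    let st' := pathway.foldl
      (fun st rxn => rxn.2.foldl (fun st r => (st.1, st.2 ++ [r])) (rxn.1.foldl pvAReact st)) st
    ((st'.1.count s, st'.2.count s) : Nat × Nat) = (pvEvs s pathway).foldl pvStep (st.1.count s, st.2.count s) := by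
  induction pathway generalizing st with
  | nil => simp [pvEvs]
  | cons rxn rest ih =>
    simp only [pvEvs, List.flatMap_cons, List.foldl_append, List.foldl_cons]
    rw [← pvEvs]
    rw [ih, pvAProd_count, pvAReact_count]

theorem pvStep_balLow (evs : List Int) (h : ∀ e ∈ evs, e = -1 ∨ e = 1)
    (bal low : Int) (i c : Nat) (h0 : low ≤ 0) (h1 : low ≤ bal)
    (hi : (i : Int) = -low) (hc : (c : Int) = bal - low) :
    evs.foldl pvStep (i, c)
      = (let q := evs.foldl (fun p e => (p.1 + e, if p.1 + e < p.2 then p.1 + e else p.2)) (bal, low)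
         ((-q.2).toNat, (q.1 - q.2).toNat)) := by
  induction evs generalizing bal low i c with
  | nil =>
    simp only [List.foldl_nil, Prod.mk.injEq]
    constructor <;> omega
  | cons e rest ih =>
    have he := h e (by simp)
    have hrest : ∀ x ∈ rest, x = -1 ∨ x = 1 := fun x hx => h x (by simp [hx])
    rw [List.foldl_cons, List.foldl_cons]
    rcases he with he | he <;> subst he
    · by_cases hc : c = 0
      · have hbl : bal = low := by omega
        have hst : pvStep (i, c) (-1) = (i + 1, c) := by simp [pvStep, hc]
        rw [hst]
        have hlt : bal + -1 < low := by omega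
        rw [ih hrest (bal + -1) (bal + -1) (i + 1) c (by omega) (by omega) (by omega) (by omega)]
        simp [hlt]
      · have hgt : low < bal := by omega
        have hst : pvStep (i, c) (-1) = (i, c - 1) := by simp [pvStep, hc]
        rw [hst]
        have hge : ¬ bal + -1 < low := by omega
        rw [ih hrest (bal + -1) low i (c - 1) h0 (by omega) hi (by omega)]
        simp [hge]
    · have hst : pvStep (i, c) 1 = (i, c + 1) := by simp [pvStep]
      rw [hst]
      have hge : ¬ bal + 1 < low := by omega
      rw [ih hrest (bal + 1) low i (c + 1) h0 (by omega) hi (by omega)]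
      simp [hge]

theorem pvEvs_mem (s : String) (pathway : List (List String × List String)) :
    ∀ e ∈ pvEvs s pathway, e = -1 ∨ e = 1 := by
  intro e he
  simp only [pvEvs, List.mem_flatMap, List.mem_append] at he
  obtain ⟨rxn, _, h1 | h1⟩ := he
  · left; exact List.eq_of_mem_replicate h1
  · right; exact List.eq_of_mem_replicate h1

-- B's per-species event list is pvEvs
theorem pvPairs_filter (s : String) (pathway : List (List String × List String)) (acc : List (String × Int)) :
    ((pathway.foldl
        (fun acc rxn => acc ++ rxn.1.map (fun r => (r, (-1 : Int))) ++ rxn.2.map (fun p => (p, (1 : Int)))) acc).filter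
      (fun p => p.1 == s)).map (·.2)
      = (acc.filter (fun p => p.1 == s)).map (·.2) ++ pvEvs s pathway := by
  induction pathway generalizing acc with
  | nil => simp [pvEvs]
  | cons rxn rest ih =>
    rw [List.foldl_cons, ih]
    simp only [pvEvs, List.flatMap_cons]
    rw [← pvEvs]
    simp only [List.filter_append, List.map_append, List.append_assoc]
    congr 2
    · rw [List.filter_map, List.map_map]
      rw [List.count_eq_length_filter, ← List.map_const' (b := (-1 : Int))]
      rfl
    · rw [List.filter_map, List.map_map]
      rw [List.count_eq_length_filter, ← List.map_const' (b := (1 : Int))]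
      rfl

theorem pvCount_flatMap_replicate (s : String) (ks : List String) (f : String → Nat) (hnd : ks.Nodup) :
    (ks.flatMap (fun k => List.replicate (f k) k)).count s = if s ∈ ks then f s else 0 := by
  induction ks with
  | nil => simp
  | cons k ks ih =>
    simp only [List.flatMap_cons, List.count_append]
    rcases List.nodup_cons.mp hnd with ⟨hk, hnd'⟩
    by_cases hks : s = k
    · subst hks
      simp [ih hnd', hk]
    · simp [List.count_replicate, Ne.symm hks, ih hnd', hks]

-- ===== VERDICT (by name: the statement is the Claim_ definition above) =====
theorem pvMain (pathway : List (List String × List String)) :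
    minimal_initial_state pathway = minimal_initial_state_alt pathway := by
  unfold minimal_initial_state minimal_initial_state_alt
  apply PySem.List.sorted_eq_sorted_of_perm _ _ _ (fun a b h => h)
  rw [List.perm_iff_count]
  intro s
  -- A side: count s of A's initial list via the per-species machine and the bal/low pass
  have hA := pvA_count pathway ([], []) s
  simp only [List.count_nil] at hA
  have hcountA := congrArg Prod.fst hA
  simp only at hcountA
  rw [pvStep_balLow (pvEvs s pathway) (pvEvs_mem s pathway) 0 0 0 0 le_rfl le_rfl (by simp) (by simp)] at hcountA
  -- B side
  have hfilter := pvPairs_filter s pathway []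
  simp only [List.filter_nil, List.map_nil, List.nil_append] at hfilter
  have hnd : (List.foldl (fun d p => d.modify p.1 [] (· ++ [p.2])) PySem.Dict.empty
      (pathway.foldl (fun acc rxn => acc ++ rxn.1.map (fun r => (r, (-1 : Int))) ++ rxn.2.map (fun p => (p, (1 : Int)))) [])).keys.Nodup :=
    PySem.Dict.nodup_keys_foldl_modify_key _ Prod.fst [] (fun _ p => (· ++ [p.2])) PySem.Dict.empty PySem.Dict.nodup_keys_empty
  have hgetD : ∀ k, (List.foldl (fun d p => d.modify p.1 [] (· ++ [p.2])) PySem.Dict.empty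
      (pathway.foldl (fun acc rxn => acc ++ rxn.1.map (fun r => (r, (-1 : Int))) ++ rxn.2.map (fun p => (p, (1 : Int)))) [])).getD k [] = pvEvs k pathway := by
    intro k
    rw [PySem.Dict.getD_foldl_modify_append, PySem.Dict.getD_empty, List.nil_append]
    have h' := pvPairs_filter k pathway []
    simp only [List.filter_nil, List.map_nil, List.nil_append] at h'
    exact h'
  rw [PySem.Dict.items_eq_map_keys _ hnd [], PySem.List.foldl_append_eq_flatMap, List.nil_append,
      List.flatMap_map]
  have hcountB := pvCount_flatMap_replicate s
      (List.foldl (fun d p => d.modify p.1 [] (· ++ [p.2])) PySem.Dict.empty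
        (pathway.foldl (fun acc rxn => acc ++ rxn.1.map (fun r => (r, (-1 : Int))) ++ rxn.2.map (fun p => (p, (1 : Int)))) [])).keys
      (fun k => (-(pvBalLow (pvEvs k pathway)).2).toNat) hnd
  simp only [hgetD]
  rw [hcountB, hcountA]
  by_cases hmem : s ∈ (List.foldl (fun d p => d.modify p.1 [] (· ++ [p.2])) PySem.Dict.empty
      (pathway.foldl (fun acc rxn => acc ++ rxn.1.map (fun r => (r, (-1 : Int))) ++ rxn.2.map (fun p => (p, (1 : Int)))) [])).keys
  · rw [if_pos hmem]
    rfl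
  · -- s never occurs in the pathway, so its event list is empty
    have hnotin : s ∉ (pathway.foldl (fun acc rxn => acc ++ rxn.1.map (fun r => (r, (-1 : Int))) ++ rxn.2.map (fun p => (p, (1 : Int)))) []).map Prod.fst := by
      intro hs
      apply hmem
      rw [PySem.Dict.keys_foldl_modify_key _ Prod.fst [] (fun _ p => (· ++ [p.2])) PySem.Dict.empty]
      exact (PySem.Set.mem_update _ _ _).mpr (Or.inr hs)
    have hnil : (pathway.foldl (fun acc rxn => acc ++ rxn.1.map (fun r => (r, (-1 : Int))) ++ rxn.2.map (fun p => (p, (1 : Int)))) []).filter (fun p => p.1 == s) = [] := by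
      rw [List.filter_eq_nil_iff]
      intro p hp hps
      exact hnotin (List.mem_map.mpr ⟨p, hp, by simpa using hps⟩)
    have hevs : pvEvs s pathway = [] := by rw [← hfilter, hnil, List.map_nil]
    rw [if_neg hmem, hevs]
    rfl

-- ===== VERDICT (by name: the statement is the Claim_ definition above) =====
theorem minimal_initial_state_spec : Claim_equal_minimal_initial_state := by
  intro pathway _
  unfold Spec_minimal_initial_state
  exact pvMain pathway
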